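-- pv_equiv track=rewrite | github.com/cutejiuges/leetcode-practice | python-version/LC2438/product_queries.py | __constructBinArray
-- ===== SOURCE A (Python) =====
-- from typing import List
--
-- def __constructBinArray(n: int) -> List[int]:
--     bins = []
--     base = 1
--     while n > 0:
--         if n & 1 == 1:
--             bins.append(base)
--         base <<= 1
--         n >>= 1
--     return bins
-- ===== SOURCE B (Python) =====
-- from typing import List
--
-- def __constructBinArray(n: int) -> List[int]:
--     # Recursive decomposition: powers of two of n are 1 (if n is odd)
--     # followed by the doubled powers of n // 2.
--     if n <= 0:
--         return []
--     rest = [2 * p for p in __constructBinArray(n // 2)]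
--     return ([1] + rest) if n % 2 == 1 else rest
-- ===== Notes on version B (the rewrite author's own statement) =====
-- stated objective: alternative
-- what changed: Replaces the iterative while-loop that shifts a base accumulator with a recursive decomposition: recurse on the halved input, double every element of the recursive result, and prepend the unit power when the input is odd; no mutable state or base accumulator remains.
import Mathlib
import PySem

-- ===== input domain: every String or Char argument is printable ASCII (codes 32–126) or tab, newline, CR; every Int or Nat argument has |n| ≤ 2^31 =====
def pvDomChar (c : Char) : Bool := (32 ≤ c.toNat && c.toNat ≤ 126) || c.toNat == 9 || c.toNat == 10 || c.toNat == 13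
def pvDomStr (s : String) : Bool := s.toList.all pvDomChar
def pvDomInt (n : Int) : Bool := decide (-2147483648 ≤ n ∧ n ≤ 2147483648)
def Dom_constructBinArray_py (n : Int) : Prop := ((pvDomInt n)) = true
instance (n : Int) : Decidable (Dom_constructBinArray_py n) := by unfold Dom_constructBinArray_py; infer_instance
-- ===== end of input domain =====

-- B replaces A's while-loop with a base accumulator by a recursive decomposition on n // 2 (alternative; same cost).

-- ===== PORT A =====
-- the while loop, carrying the Python loop state (n, base, bins);
-- for any int n, Python's 'n & 1' equals n % 2 (floor mod) and 'n >>= 1' is n //= 2, ported exactly so.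
def pyConstructLoop (n : Int) (base : Int) (bins : List Int) : List Int :=
  if h : n > 0 then
    pyConstructLoop (PySem.Int.floordiv n 2) (base * 2)
      (if PySem.Int.mod n 2 = 1 then bins ++ [base] else bins)
  else bins
termination_by n.toNat
decreasing_by
  rw [PySem.Int.floordiv_eq_ediv_of_pos (by omega)]
  omega

def constructBinArray_py (n : Int) : List Int :=
  pyConstructLoop n 1 []

-- ===== PORT B =====
def constructBinArray_py_alt (n : Int) : List Int :=
  if h : n ≤ 0 then []
  else
    let rest := (constructBinArray_py_alt (PySem.Int.floordiv n 2)).map (fun p => 2 * p)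
    if PySem.Int.mod n 2 = 1 then 1 :: rest else rest
termination_by n.toNat
decreasing_by
  rw [PySem.Int.floordiv_eq_ediv_of_pos (by omega)]
  omega

-- ===== PRECONDITION & SPEC =====
def Spec_constructBinArray_py (n : Int) (out : List Int) : Prop := out = constructBinArray_py_alt n
instance (n : Int) (out : List Int) : Decidable (Spec_constructBinArray_py n out) := by unfold Spec_constructBinArray_py; infer_instance

-- ===== CLAIM (what is proved, stated in full; the proofs are below) =====
def Claim_equal_constructBinArray_py : Prop := ∀ (n : Int), Dom_constructBinArray_py n → Spec_constructBinArray_py n (constructBinArray_py n)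

-- ===== LEMMAS AND PROOFS =====

-- loop invariant: the loop appends to bins the powers of B, each scaled by the current base
theorem pyConstructLoop_eq_alt (N : Nat) :
    ∀ (n base : Int) (bins : List Int), n.toNat ≤ N →
      pyConstructLoop n base bins = bins ++ (constructBinArray_py_alt n).map (fun p => p * base) := by
  induction N with
  | zero =>
    intro n base bins hN
    have hn : n ≤ 0 := by omega
    rw [pyConstructLoop, constructBinArray_py_alt]
    simp [hn, not_lt.mpr hn]
  | succ N ih =>
    intro n base bins hN
    by_cases h : n > 0
    · have hdiv : PySem.Int.floordiv n 2 = n / 2 :=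
        PySem.Int.floordiv_eq_ediv_of_pos (by omega)
      have hm : (PySem.Int.floordiv n 2).toNat ≤ N := by rw [hdiv]; omega
      rw [pyConstructLoop, constructBinArray_py_alt]
      rw [dif_pos h, dif_neg (not_le.mpr h)]
      rw [ih _ (base * 2) _ hm]
      have hmap : ∀ L : List Int,
          List.map (fun p => p * (base * 2)) L
            = List.map (fun p => p * base) (List.map (fun p => 2 * p) L) := by
        intro L
        rw [List.map_map]
        exact List.map_congr_left (fun a _ => by simp only [Function.comp]; ring)
      by_cases hodd : PySem.Int.mod n 2 = 1
      · rw [if_pos hodd, if_pos hodd, List.map_cons, one_mul, ← hmap]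
        simp
      · rw [if_neg hodd, if_neg hodd, ← hmap]
    · have hn : n ≤ 0 := by omega
      rw [pyConstructLoop, constructBinArray_py_alt]
      simp [hn, h]

-- ===== VERDICT (by name: the statement is the Claim_ definition above) =====
theorem constructBinArray_py_spec : Claim_equal_constructBinArray_py := by
  intro n _
  unfold Spec_constructBinArray_py constructBinArray_py
  rw [pyConstructLoop_eq_alt n.toNat n 1 [] (le_refl _)]
  simp
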